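-- pv_equiv track=rewrite | github.com/kenken6696/atcoder | abc250/b/main.py | make_i_tiles
-- ===== SOURCE A (Python) =====
-- def make_i_tiles(start_color, a, b, n):
--     w_tile = '.'*b
--     b_tile = '#'*b
--     color = start_color
--     tile_c = ''
--     for i in range(n):
--         if color == 'w':
--             tile_c += w_tile
--             color = 'b'
--         else:
--             tile_c += b_tile
--             color = 'w'
--     i_tiles = [tile_c for _ in range(a)]
--     return i_tiles
-- ===== SOURCE B (Python) =====
-- def make_i_tiles(start_color, a, b, n):
--     w_tile = '.' * b
--     b_tile = '#' * b
--     first, second = (w_tile, b_tile) if start_color == 'w' else (b_tile, w_tile)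
--     m = max(n, 0)
--     row = (first + second) * (m // 2) + (first if m % 2 else '')
--     return [row] * a
-- ===== Notes on version B (the rewrite author's own statement) =====
-- stated objective: simpler
-- what changed: B replaces A's n-iteration color-flipping accumulation loop by a closed-form construction: pick the (first, second) tile pair from start_color, build the row as (first+second)*(n//2) plus the odd leftover, and return [row]*a.
import Mathlib
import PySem

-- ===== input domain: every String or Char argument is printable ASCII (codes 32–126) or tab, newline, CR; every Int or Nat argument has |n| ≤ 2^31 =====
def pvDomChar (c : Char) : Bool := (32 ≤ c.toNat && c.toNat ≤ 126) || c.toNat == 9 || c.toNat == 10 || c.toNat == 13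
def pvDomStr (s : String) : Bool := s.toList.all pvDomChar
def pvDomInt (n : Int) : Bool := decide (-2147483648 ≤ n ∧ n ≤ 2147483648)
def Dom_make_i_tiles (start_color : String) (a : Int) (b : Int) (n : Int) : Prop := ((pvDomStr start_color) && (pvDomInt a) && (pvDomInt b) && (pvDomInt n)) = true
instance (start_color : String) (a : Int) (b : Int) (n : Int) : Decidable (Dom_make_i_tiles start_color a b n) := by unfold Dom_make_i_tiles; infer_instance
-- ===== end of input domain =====

-- B builds the row in closed form from the period-2 pattern (pair repeated n//2 times plus an
-- odd leftover) instead of A's per-tile loop flipping a color flag; objective: simpler.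

-- Python 's * k' (string repetition; k ≤ 0 gives '')
def pvStrMul (s : String) (k : Int) : String := String.join (List.replicate k.toNat s)

-- ===== PORT A =====
def make_i_tiles (start_color : String) (a : Int) (b : Int) (n : Int) : List String :=
  let w_tile := pvStrMul "." b
  let b_tile := pvStrMul "#" b
  -- for i in range(n): flip color, append the matching tile
  let st := (PySem.List.pyRange 0 n 1).foldl
    (fun (st : String × String) _ =>
      if st.1 = "w" then ("b", st.2 ++ w_tile) else ("w", st.2 ++ b_tile))
    (start_color, "")
  -- [tile_c for _ in range(a)]
  (PySem.List.pyRange 0 a 1).map (fun _ => st.2)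

-- ===== PORT B =====
def make_i_tiles_alt (start_color : String) (a : Int) (b : Int) (n : Int) : List String :=
  let w_tile := pvStrMul "." b
  let b_tile := pvStrMul "#" b
  let fs := if start_color = "w" then (w_tile, b_tile) else (b_tile, w_tile)
  let m : Int := max n 0
  let row := pvStrMul (fs.1 ++ fs.2) (PySem.Int.floordiv m 2) ++
             (if PySem.Int.mod m 2 ≠ 0 then fs.1 else "")
  List.replicate a.toNat row

-- ===== PRECONDITION & SPEC =====
def Spec_make_i_tiles (start_color : String) (a : Int) (b : Int) (n : Int) (out : List String) : Prop := out = make_i_tiles_alt start_color a b n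
instance (start_color : String) (a : Int) (b : Int) (n : Int) (out : List String) : Decidable (Spec_make_i_tiles start_color a b n out) := by unfold Spec_make_i_tiles; infer_instance

-- ===== CLAIM (what is proved, stated in full; the proofs are below) =====
def Claim_equal_make_i_tiles : Prop := ∀ (start_color : String) (a : Int) (b : Int) (n : Int), Dom_make_i_tiles start_color a b n → Spec_make_i_tiles start_color a b n (make_i_tiles start_color a b n)

-- ===== LEMMAS AND PROOFS =====

-- the loop body of A, as a function of the state only (it ignores the range element)
def pvStep (w b : String) (st : String × String) : String × String :=
  if st.1 = "w" then ("b", st.2 ++ w) else ("w", st.2 ++ b)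

-- the string A's loop appends over k iterations starting from color c
def pvPat (w b : String) : String → Nat → String
  | _, 0 => ""
  | c, k+1 => (if c = "w" then w ++ pvPat w b "b" k else b ++ pvPat w b "w" k)

theorem pvStrMul_nat (s : String) (k : Nat) : pvStrMul s (k : Int) = String.join (List.replicate k s) := by
  simp [pvStrMul]

theorem pvJoin_foldl (l : List String) (init : String) :
    List.foldl (· ++ ·) init l = init ++ String.join l := by
  induction l generalizing init with
  | nil => show init = init ++ "" ; simp
  | cons x xs ih =>
    rw [List.foldl_cons, ih]
    show _ = init ++ List.foldl (· ++ ·) ("" ++ x) xs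
    rw [ih]
    simp [String.append_assoc]

theorem pvJoin_cons (x : String) (l : List String) :
    String.join (x :: l) = x ++ String.join l := by
  show List.foldl (· ++ ·) "" (x :: l) = _
  rw [List.foldl_cons, pvJoin_foldl]
  simp

theorem foldl_const_iterate {α β : Type} (g : β → β) (l : List α) (init : β) :
    l.foldl (fun st _ => g st) init = g^[l.length] init := by
  induction l generalizing init with
  | nil => rfl
  | cons x xs ih => simp [List.foldl, ih, Function.iterate_succ_apply]

theorem pvStep_iterate (w b : String) (k : Nat) (c t : String) :
    ((pvStep w b)^[k] (c, t)).2 = t ++ pvPat w b c k := by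
  induction k generalizing c t with
  | zero => simp [pvPat]
  | succ k ih =>
    rw [Function.iterate_succ_apply]
    by_cases hc : c = "w" <;>
      simp [pvStep, hc, pvPat, ih, String.append_assoc]

theorem pvPat_ne_w (w b c : String) (hc : c ≠ "w") (k : Nat) :
    pvPat w b c k = pvPat w b "b" k := by
  cases k with
  | zero => rfl
  | succ k => simp [pvPat, hc]

theorem pvPat_two (w b c : String) (k : Nat) :
    pvPat w b c (k + 2) =
      (if c = "w" then w ++ b else b ++ w) ++ pvPat w b c k := by
  by_cases hc : c = "w"
  · simp [pvPat, hc, String.append_assoc]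
  · simp [pvPat, hc, String.append_assoc, pvPat_ne_w w b c hc k]

theorem pvPat_closed (w b c : String) (q r : Nat) (hr : r < 2) :
    pvPat w b c (2 * q + r) =
      String.join (List.replicate q ((if c = "w" then (w, b) else (b, w)).1 ++
                                     (if c = "w" then (w, b) else (b, w)).2)) ++
      (if r ≠ 0 then (if c = "w" then (w, b) else (b, w)).1 else "") := by
  induction q with
  | zero =>
    interval_cases r
    · simp [pvPat, String.join]
    · by_cases hc : c = "w" <;> simp [pvPat, hc, String.join]
  | succ q ih =>
    have h2 : 2 * (q + 1) + r = (2 * q + r) + 2 := by omega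
    rw [h2, pvPat_two, ih, List.replicate_succ, pvJoin_cons]
    by_cases hc : c = "w" <;> simp [hc, String.append_assoc]

theorem make_i_tiles_row_eq (start_color w b : String) (n : Int) :
    ((PySem.List.pyRange 0 n 1).foldl
      (fun (st : String × String) _ =>
        if st.1 = "w" then ("b", st.2 ++ w) else ("w", st.2 ++ b))
      (start_color, "")).2 =
    pvStrMul ((if start_color = "w" then (w, b) else (b, w)).1 ++
              (if start_color = "w" then (w, b) else (b, w)).2)
        (PySem.Int.floordiv (max n 0) 2) ++
      (if PySem.Int.mod (max n 0) 2 ≠ 0 then (if start_color = "w" then (w, b) else (b, w)).1 else "") := by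
  have hfold :
      ((PySem.List.pyRange 0 n 1).foldl
        (fun (st : String × String) _ =>
          if st.1 = "w" then ("b", st.2 ++ w) else ("w", st.2 ++ b))
        (start_color, "")) = (pvStep w b)^[(PySem.List.pyRange 0 n 1).length] (start_color, "") := by
    rw [← foldl_const_iterate]; rfl
  rw [hfold, pvStep_iterate]
  set k : Nat := (PySem.List.pyRange 0 n 1).length with hk
  have hklen : k = (n - 0).toNat := by rw [hk, PySem.List.length_pyRange_one]
  have hm : max n 0 = (k : Int) := by omega
  have hdiv : PySem.Int.floordiv (max n 0) 2 = ((k / 2 : Nat) : Int) := by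
    rw [hm]; exact_mod_cast PySem.Int.floordiv_natCast k 2
  have hmod : PySem.Int.mod (max n 0) 2 = ((k % 2 : Nat) : Int) := by
    rw [hm]; exact_mod_cast PySem.Int.mod_natCast k 2
  rw [hdiv, hmod, pvStrMul_nat]
  have hp := pvPat_closed w b start_color (k / 2) (k % 2) (by omega)
  have hk2 : 2 * (k / 2) + k % 2 = k := by omega
  rw [hk2] at hp
  rw [hp]
  by_cases h0 : k % 2 = 0
  · simp [h0]
  · simp [h0]
    intro hdvd
    exfalso
    omega

theorem make_i_tiles_spec : Claim_equal_make_i_tiles := by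
  intro start_color a b n _
  unfold Spec_make_i_tiles make_i_tiles make_i_tiles_alt
  simp only
  rw [make_i_tiles_row_eq start_color (pvStrMul "." b) (pvStrMul "#" b) n]
  rw [PySem.List.pyRange_one]
  simp only [List.map_map, Function.comp_def]
  rw [List.map_const']
  simp
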